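-- pv_equiv track=rewrite | github.com/stanfordnlp/stanza | stanza/models/common/utils.py | misc_to_space_before
-- ===== SOURCE A (Python) =====
-- def unescape_misc_space(misc_space):
--     spaces = []
--     pos = 0
--     while pos < len(misc_space):
--         if misc_space[pos:pos+2] == '\\s':
--             spaces.append(' ')
--             pos += 2
--         elif misc_space[pos:pos+2] == '\\t':
--             spaces.append('\t')
--             pos += 2
--         elif misc_space[pos:pos+2] == '\\r':
--             spaces.append('\r')
--             pos += 2
--         elif misc_space[pos:pos+2] == '\\n':
--             spaces.append('\n')
--             pos += 2
--         elif misc_space[pos:pos+2] == '\\p':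
--             spaces.append('|')
--             pos += 2
--         elif misc_space[pos:pos+2] == '\\\\':
--             spaces.append('\\')
--             pos += 2
--         elif misc_space[pos:pos+6] == '\\u00A0':
--             spaces.append(' ')
--             pos += 6
--         else:
--             spaces.append(misc_space[pos])
--             pos += 1
--     unescaped_space = "".join(spaces)
--     return unescaped_space
--
-- def misc_to_space_before(misc):
--     """
--     Find any SpacesBefore annotation in the MISC column and turn it into a space value
--     """
--     if not misc:
--         return ""
--     pieces = misc.split("|")
--     for piece in pieces:
--         if not piece.lower().startswith("spacesbefore="):
--             continue
--         misc_space = piece.split("=", maxsplit=1)[1]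
--         return unescape_misc_space(misc_space)
--     return ""
-- ===== SOURCE B (Python) =====
-- _PREFIX = "spacesbefore="
--
-- _ESC = {'s': ' ', 't': '\t', 'r': '\r', 'n': '\n', 'p': '|'}
--
--
-- def _decode(misc_space):
--     # split on single backslashes; every escape starts at one of the cut points
--     parts = misc_space.split('\\')
--     out = [parts[0]]
--     i = 1
--     while i < len(parts):
--         seg = parts[i]
--         if seg == '':
--             # two consecutive backslashes (or a lone trailing one): literal backslash
--             out.append('\\')
--             if i + 1 < len(parts):
--                 out.append(parts[i + 1])
--             i += 2
--         elif seg[0] in _ESC: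
--             out.append(_ESC[seg[0]])
--             out.append(seg[1:])
--             i += 1
--         elif seg.startswith('u00A0'):
--             out.append('\u00A0')
--             out.append(seg[5:])
--             i += 1
--         else:
--             out.append('\\')
--             out.append(seg)
--             i += 1
--     return ''.join(out)
--
--
-- def misc_to_space_before(misc):
--     piece = next((p for p in misc.split("|") if p.lower().startswith(_PREFIX)), None)
--     return _decode(piece[len(_PREFIX):]) if piece is not None else ""
-- ===== Notes on version B (the rewrite author's own statement) =====
-- stated objective: alternative
-- what changed: The manual index-advancing escape scanner is replaced by splitting the annotation once on backslashes and decoding each segment's head through an escape table, and the piece-scanning for-loop by a single next()/find over the split pieces with the fixed-length lowercase prefix sliced off instead of re-splitting on the equals sign.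
import Mathlib
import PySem

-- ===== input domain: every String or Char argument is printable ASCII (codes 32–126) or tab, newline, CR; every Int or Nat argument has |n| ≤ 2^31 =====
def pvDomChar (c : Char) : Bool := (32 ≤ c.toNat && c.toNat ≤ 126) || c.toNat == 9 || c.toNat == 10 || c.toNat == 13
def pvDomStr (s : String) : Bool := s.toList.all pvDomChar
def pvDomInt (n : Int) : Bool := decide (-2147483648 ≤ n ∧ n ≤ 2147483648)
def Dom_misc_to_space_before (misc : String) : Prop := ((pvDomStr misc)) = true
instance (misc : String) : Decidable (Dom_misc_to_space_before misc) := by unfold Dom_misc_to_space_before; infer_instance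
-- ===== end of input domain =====

-- A scans with an index-advancing if/elif chain; B splits on backslashes once and decodes each
-- segment's head through a table — an alternative decomposition of the same decoder (same cost).

-- ===== PORT A =====
-- unescape_misc_space: the while loop over pos, ported as recursion on the remaining suffix
-- (misc_space[pos:pos+k] is the `take k` of the suffix, pos += k drops k characters).
def pvUnescA : List Char → List Char
  | [] => []
  | c :: rest =>
    if (c :: rest).take 2 = ['\\', 's'] then ' ' :: pvUnescA (rest.drop 1)
    else if (c :: rest).take 2 = ['\\', 't'] then '\t' :: pvUnescA (rest.drop 1)
    else if (c :: rest).take 2 = ['\\', 'r'] then '\r' :: pvUnescA (rest.drop 1)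
    else if (c :: rest).take 2 = ['\\', 'n'] then '\n' :: pvUnescA (rest.drop 1)
    else if (c :: rest).take 2 = ['\\', 'p'] then '|' :: pvUnescA (rest.drop 1)
    else if (c :: rest).take 2 = ['\\', '\\'] then '\\' :: pvUnescA (rest.drop 1)
    else if (c :: rest).take 6 = ['\\', 'u', '0', '0', 'A', '0'] then '\u00A0' :: pvUnescA (rest.drop 5)
    else c :: pvUnescA rest
  termination_by cs => cs.length
  decreasing_by all_goals simp

-- the `for piece in pieces` loop
def pvLoopA : List String → String
  | [] => ""
  | p :: ps =>
    if !(PySem.Str.startswith (PySem.Str.lower p) "spacesbefore=") then pvLoopA ps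
    else
      -- piece.split("=", maxsplit=1)[1]: index 1 always exists here, since the piece
      -- starts with "spacesbefore=" (so "=" occurs); pyGetD's default is unreachable.
      let misc_space := PySem.List.pyGetD ((PySem.Str.splitMax? p "=" 1).getD []) 1 ""
      String.ofList (pvUnescA misc_space.toList)

def misc_to_space_before (misc : String) : String :=
  if misc = "" then ""
  else pvLoopA ((PySem.Str.split? misc "|").getD [])   -- "|" is non-empty, split? is `some`

-- ===== PORT B =====
-- the _ESC table
def pvEsc? (c : Char) : Option Char :=
  if c = 's' then some ' '
  else if c = 't' then some '\t'
  else if c = 'r' then some '\r'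
  else if c = 'n' then some '\n'
  else if c = 'p' then some '|'
  else none

-- the while loop over parts[1:]: each segment is preceded by one backslash of the input;
-- pvSegDec decodes one segment (escape head + literal tail)
def pvSegDec (c : Char) (cr : List Char) : List Char :=
  match pvEsc? c with
  | some e => e :: cr
  | none =>
    if (c :: cr).take 5 = ['u', '0', '0', 'A', '0'] then '\u00A0' :: (c :: cr).drop 5
    else '\\' :: c :: cr

def pvGoB : List (List Char) → List Char
  | [] => []
  | [] :: [] => ['\\']
  | [] :: q :: qs => '\\' :: (q ++ pvGoB qs)
  | (c :: cr) :: qs => pvSegDec c cr ++ pvGoB qs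

-- _decode: split on '\\', keep parts[0], decode the rest, join
def pvDecodeB (s : String) : String :=
  match (PySem.Chars.split? s.toList ['\\']).getD [] with
  | [] => ""   -- unreachable: str.split never returns an empty list
  | p :: ps => String.ofList (p ++ pvGoB ps)

def misc_to_space_before_alt (misc : String) : String :=
  match ((PySem.Str.split? misc "|").getD []).find?
      (fun p => PySem.Str.startswith (PySem.Str.lower p) "spacesbefore=") with
  | some p => pvDecodeB (PySem.Str.slice p (some 13) none)   -- piece[len("spacesbefore="):]
  | none => ""

-- ===== PRECONDITION & SPEC =====
def Spec_misc_to_space_before (misc : String) (out : String) : Prop := out = misc_to_space_before_alt misc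
instance (misc : String) (out : String) : Decidable (Spec_misc_to_space_before misc out) := by unfold Spec_misc_to_space_before; infer_instance

-- ===== CLAIM (what is proved, stated in full; the proofs are below) =====
def Claim_equal_misc_to_space_before : Prop := ∀ (misc : String), Dom_misc_to_space_before misc → Spec_misc_to_space_before misc (misc_to_space_before misc)

-- ===== LEMMAS AND PROOFS =====

-- proof-side model of str.split('\\') (single-character separator)
def pvSBS : List Char → List (List Char)
  | [] => [[]]
  | c :: rest =>
    if c = '\\' then [] :: pvSBS rest
    else
      match pvSBS rest with
      | p :: ps => (c :: p) :: ps
      | [] => [[c]]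

theorem pvSBS_ne_nil (cs : List Char) : pvSBS cs ≠ [] := by
  induction cs with
  | nil => simp [pvSBS]
  | cons c rest ih =>
    simp only [pvSBS]
    split
    · simp
    · cases h : pvSBS rest <;> simp

theorem pvSplitOn_go_eq (cs : List Char) : ∀ (fuel : Nat) (cur : List Char) (acc : List (List Char)),
    cs.length < fuel →
    PySem.Chars.splitOn.go ['\\'] fuel cs cur acc =
      acc.reverse ++ (match pvSBS cs with
                      | [] => [cur.reverse]
                      | p :: ps => (cur.reverse ++ p) :: ps) := by
  induction cs with
  | nil =>
    intro fuel cur acc hf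
    cases fuel with
    | zero => omega
    | succ f => simp [PySem.Chars.splitOn.go, pvSBS]
  | cons c rest ih =>
    intro fuel cur acc hf
    cases fuel with
    | zero => omega
    | succ f =>
      rw [PySem.Chars.splitOn.go]
      by_cases hc : c = '\\'
      · subst hc
        have hp : List.isPrefixOf ['\\'] ('\\' :: rest) = true := by simp [List.isPrefixOf]
        simp only [hp, if_true]
        have hdrop : List.drop (['\\'].length) ('\\' :: rest) = rest := by simp
        rw [hdrop, ih f [] (cur.reverse :: acc) (by simp at hf; omega)]
        cases h : pvSBS rest with
        | nil => exact absurd h (pvSBS_ne_nil rest)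
        | cons p ps => simp [pvSBS, h]
      · have hp : List.isPrefixOf ['\\'] (c :: rest) = false := by
          simp [List.isPrefixOf]; intro h; exact absurd h.symm hc
        simp only [hp, Bool.false_eq_true, if_false]
        rw [ih f (c :: cur) acc (by simp at hf ⊢; omega)]
        cases h : pvSBS rest with
        | nil => exact absurd h (pvSBS_ne_nil rest)
        | cons p ps => simp [pvSBS, h, hc]

theorem pvSplitOn_eq (cs : List Char) : PySem.Chars.splitOn cs ['\\'] = pvSBS cs := by
  unfold PySem.Chars.splitOn
  rw [pvSplitOn_go_eq cs (cs.length + 1) [] [] (by omega)]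
  cases h : pvSBS cs with
  | nil => exact absurd h (pvSBS_ne_nil cs)
  | cons p ps => simp

-- the head of pvSBS is a prefix of the input
theorem pvSBS_head_prefix (t : List Char) : ∀ (p : List Char) (ps : List (List Char)),
    pvSBS t = p :: ps → p <+: t := by
  induction t with
  | nil => intro p ps h; simp [pvSBS] at h; simp [h.1]
  | cons c rest ih =>
    intro p ps h
    simp only [pvSBS] at h
    split at h
    · cases h; simp
    · rename_i hc
      cases hr : pvSBS rest with
      | nil => exact absurd hr (pvSBS_ne_nil rest)
      | cons q qs =>
        rw [hr] at h
        injection h with h1 h2; subst h1; subst h2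
        exact List.cons_prefix_cons.mpr ⟨rfl, ih q qs hr⟩

-- as long as no backslash has been seen, the head of pvSBS agrees with the input …
theorem pvSBS_take (t : List Char) : ∀ (n : Nat) (p : List Char) (ps : List (List Char)),
    pvSBS t = p :: ps → '\\' ∉ t.take n → p.take n = t.take n := by
  induction t with
  | nil => intro n p ps h _; simp [pvSBS] at h; simp [h.1]
  | cons c rest ih =>
    intro n p ps h hn
    cases n with
    | zero => simp
    | succ m =>
      simp only [List.take_succ_cons, List.mem_cons, not_or] at hn
      have hc : c ≠ '\\' := fun he => hn.1 he.symm
      simp only [pvSBS, hc, if_false] at h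
      cases hr : pvSBS rest with
      | nil => exact absurd hr (pvSBS_ne_nil rest)
      | cons q qs =>
        rw [hr] at h
        injection h with h1 h2; subst h1; subst h2
        simp only [List.take_succ_cons]
        rw [ih m q qs hr hn.2]

-- … and dropping inside the backslash-free head drops inside the input
theorem pvSBS_drop (t : List Char) : ∀ (n : Nat) (p : List Char) (ps : List (List Char)),
    pvSBS t = p :: ps → '\\' ∉ t.take n → pvSBS (t.drop n) = p.drop n :: ps := by
  induction t with
  | nil => intro n p ps h _; simp [pvSBS] at h ⊢; simp [h.1, h.2]
  | cons c rest ih =>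
    intro n p ps h hn
    cases n with
    | zero => simpa using h
    | succ m =>
      simp only [List.take_succ_cons, List.mem_cons, not_or] at hn
      have hc : c ≠ '\\' := fun he => hn.1 he.symm
      simp only [pvSBS, hc, if_false] at h
      cases hr : pvSBS rest with
      | nil => exact absurd hr (pvSBS_ne_nil rest)
      | cons q qs =>
        rw [hr] at h
        injection h with h1 h2; subst h1; subst h2
        simpa using ih m q qs hr hn.2

-- glue for the decoded segments
def pvHT : List (List Char) → List Char
  | [] => []
  | p :: ps => p ++ pvGoB ps

-- the heart of the proof: A's scan equals B's split-and-decode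
theorem pvUnescA_eq_HT (cs : List Char) : pvUnescA cs = pvHT (pvSBS cs) := by
  induction cs using pvUnescA.induct with
  | case1 => simp [pvUnescA, pvSBS, pvHT, pvGoB]
  | case2 c rest h ih =>
    cases rest with
    | nil => simp at h
    | cons d t =>
      obtain ⟨rfl, rfl⟩ : c = '\\' ∧ d = 's' := by simpa using h
      simp only [List.drop_succ_cons, List.drop_zero] at ih
      cases hp : pvSBS t with
      | nil => exact absurd hp (pvSBS_ne_nil t)
      | cons p ps =>
        rw [pvUnescA]
        simp [pvSBS, pvHT, pvGoB, pvSegDec, pvEsc?, hp, ih]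
  | case3 c rest h1 h ih =>
    cases rest with
    | nil => simp at h
    | cons d t =>
      obtain ⟨rfl, rfl⟩ : c = '\\' ∧ d = 't' := by simpa using h
      simp only [List.drop_succ_cons, List.drop_zero] at ih
      cases hp : pvSBS t with
      | nil => exact absurd hp (pvSBS_ne_nil t)
      | cons p ps =>
        rw [pvUnescA]
        simp [pvSBS, pvHT, pvGoB, pvSegDec, pvEsc?, hp, ih]
  | case4 c rest h1 h2 h ih =>
    cases rest with
    | nil => simp at h
    | cons d t =>
      obtain ⟨rfl, rfl⟩ : c = '\\' ∧ d = 'r' := by simpa using h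
      simp only [List.drop_succ_cons, List.drop_zero] at ih
      cases hp : pvSBS t with
      | nil => exact absurd hp (pvSBS_ne_nil t)
      | cons p ps =>
        rw [pvUnescA]
        simp [pvSBS, pvHT, pvGoB, pvSegDec, pvEsc?, hp, ih]
  | case5 c rest h1 h2 h3 h ih =>
    cases rest with
    | nil => simp at h
    | cons d t =>
      obtain ⟨rfl, rfl⟩ : c = '\\' ∧ d = 'n' := by simpa using h
      simp only [List.drop_succ_cons, List.drop_zero] at ih
      cases hp : pvSBS t with
      | nil => exact absurd hp (pvSBS_ne_nil t)
      | cons p ps =>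
        rw [pvUnescA]
        simp [pvSBS, pvHT, pvGoB, pvSegDec, pvEsc?, hp, ih]
  | case6 c rest h1 h2 h3 h4 h ih =>
    cases rest with
    | nil => simp at h
    | cons d t =>
      obtain ⟨rfl, rfl⟩ : c = '\\' ∧ d = 'p' := by simpa using h
      simp only [List.drop_succ_cons, List.drop_zero] at ih
      cases hp : pvSBS t with
      | nil => exact absurd hp (pvSBS_ne_nil t)
      | cons p ps =>
        rw [pvUnescA]
        simp [pvSBS, pvHT, pvGoB, pvSegDec, pvEsc?, hp, ih]
  | case7 c rest h1 h2 h3 h4 h5 h ih =>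
    cases rest with
    | nil => simp at h
    | cons d t =>
      obtain ⟨rfl, rfl⟩ : c = '\\' ∧ d = '\\' := by simpa using h
      simp only [List.drop_succ_cons, List.drop_zero] at ih
      cases hp : pvSBS t with
      | nil => exact absurd hp (pvSBS_ne_nil t)
      | cons p ps =>
        rw [pvUnescA]
        simp [pvSBS, pvHT, pvGoB, hp, ih]
  | case8 c rest h1 h2 h3 h4 h5 h6 h ih =>
    cases rest with
    | nil => simp at h
    | cons d t =>
      have hob : c = '\\' ∧ d = 'u' ∧ t.take 4 = ['0', '0', 'A', '0'] := by
        have := h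
        simp [List.take_succ_cons] at this
        obtain ⟨rfl, rfl, h4'⟩ := this
        exact ⟨rfl, rfl, by
          cases t with
          | nil => simp at h4'
          | cons a t1 => cases t1 with
            | nil => simp at h4'
            | cons b t2 => cases t2 with
              | nil => simp at h4'
              | cons e t3 => cases t3 with
                | nil => simp at h4'
                | cons f t4 => simpa using h4'⟩
      obtain ⟨rfl, rfl, ht4⟩ := hob
      simp only [List.drop_succ_cons] at ih
      cases hp : pvSBS t with
      | nil => exact absurd hp (pvSBS_ne_nil t)
      | cons p ps =>
        have hnb : ('\\' : Char) ∉ t.take 4 := by rw [ht4]; decide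
        have hp4 : p.take 4 = ['0', '0', 'A', '0'] := (pvSBS_take t 4 p ps hp hnb).trans ht4
        have hdrop : pvSBS (t.drop 4) = p.drop 4 :: ps := pvSBS_drop t 4 p ps hp hnb
        rw [pvUnescA]
        simp only [h, if_pos, if_neg h1, if_neg h2, if_neg h3, if_neg h4, if_neg h5, if_neg h6,
          List.drop_succ_cons]
        rw [ih]
        simp [pvSBS, pvHT, pvGoB, pvSegDec, pvEsc?, hp, hdrop, List.take_succ_cons, hp4]
  | case9 c rest h1 h2 h3 h4 h5 h6 h7 ih =>
    rw [pvUnescA]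
    simp only [h1, h2, h3, h4, h5, h6, h7, if_false]
    by_cases hc : c = '\\'
    · subst hc
      cases rest with
      | nil => simp [pvUnescA, pvSBS, pvHT, pvGoB]
      | cons d t =>
        have hds : d ≠ 's' := by rintro rfl; exact h1 (by simp)
        have hdt : d ≠ 't' := by rintro rfl; exact h2 (by simp)
        have hdr : d ≠ 'r' := by rintro rfl; exact h3 (by simp)
        have hdn : d ≠ 'n' := by rintro rfl; exact h4 (by simp)
        have hdp : d ≠ 'p' := by rintro rfl; exact h5 (by simp)
        have hdb : d ≠ '\\' := by rintro rfl; exact h6 (by simp)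
        have hesc : pvEsc? d = none := by simp [pvEsc?, hds, hdt, hdr, hdn, hdp]
        cases hp : pvSBS t with
        | nil => exact absurd hp (pvSBS_ne_nil t)
        | cons p ps =>
          have hcond : ¬ (d = 'u' ∧ List.take 4 p = ['0', '0', 'A', '0']) := by
            rintro ⟨rfl, hptok⟩
            have hlen : 4 ≤ p.length := by
              have := congrArg List.length hptok
              simp at this; omega
            obtain ⟨r, hr⟩ := pvSBS_head_prefix t p ps hp
            apply h7
            have ht4 : t.take 4 = ['0', '0', 'A', '0'] := by
              rw [← hr, List.take_append_of_le_length hlen, hptok]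
            simp [List.take_succ_cons, ht4]
          rw [ih]
          simp [pvSBS, hdb, hp, pvHT, pvGoB, pvSegDec, hesc, hcond]
    · cases hr : pvSBS rest with
      | nil => exact absurd hr (pvSBS_ne_nil rest)
      | cons p ps =>
        rw [ih]
        simp [pvSBS, pvHT, hc, hr]

theorem pvDecodeB_eq (s : String) : pvDecodeB s = String.ofList (pvUnescA s.toList) := by
  unfold pvDecodeB
  have hsp : PySem.Chars.split? s.toList ['\\'] = some (pvSBS s.toList) := by
    simp [PySem.Chars.split?, pvSplitOn_eq]
  rw [hsp, Option.getD_some, pvUnescA_eq_HT]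
  cases hp : pvSBS s.toList with
  | nil => exact absurd hp (pvSBS_ne_nil s.toList)
  | cons p ps => simp [pvHT]

theorem pvLowerChar_eq_eq (c : Char) (h : PySem.Chars.lowerChar c = '=') : c = '=' := by
  unfold PySem.Chars.lowerChar at h
  split at h
  · rename_i hu
    exfalso
    unfold PySem.Chars.isupper at hu
    have h2 : ('A' ≤ c) ∧ (c ≤ 'Z') := by simpa using hu
    have h3 : 65 ≤ c.toNat := h2.1
    have h3' : c.toNat ≤ 90 := h2.2
    have h1 := congrArg Char.toNat h
    rw [Char.toNat_ofNat] at h1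
    have hv : (c.toNat + 32).isValidChar := by left; omega
    simp [hv] at h1
    have : ('=' : Char).toNat = 61 := by decide
    omega
  · exact h

-- a prefix "…=" of the lowercased string locates the first '=' in the original
theorem pvPrefixStruct (tok : List Char) (htok : '=' ∉ tok) :
    ∀ (l : List Char), (tok ++ ['=']) <+: l.map PySem.Chars.lowerChar →
      ∃ pre rest, l = pre ++ '=' :: rest ∧ '=' ∉ pre ∧ pre.length = tok.length := by
  induction tok with
  | nil =>
    intro l h
    cases l with
    | nil => simp at h
    | cons c t =>
      simp only [List.nil_append, List.map_cons, List.cons_prefix_cons] at h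
      exact ⟨[], t, by simp [pvLowerChar_eq_eq c h.1.symm], by simp, rfl⟩
  | cons a tok ih =>
    intro l h
    have ha : a ≠ '=' := fun he => htok (by simp [he])
    have htok' : '=' ∉ tok := fun hm => htok (by simp [hm])
    cases l with
    | nil => simp at h
    | cons c t =>
      simp only [List.cons_append, List.map_cons, List.cons_prefix_cons] at h
      obtain ⟨pre, rest, rfl, hnp, hlen⟩ := ih htok' t h.2
      have hc : c ≠ '=' := by
        intro he; subst he
        exact ha (by simpa using h.1)
      exact ⟨c :: pre, rest, rfl, by simp [hnp]; exact fun he => hc he.symm, by simp [hlen]⟩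

theorem pvGoMax0 (sep : List Char) (fuel : Nat) (l cur : List Char) (acc : List (List Char)) :
    PySem.Chars.splitOnMax.go sep fuel 0 l cur acc = ((cur.reverse ++ l) :: acc).reverse := by
  cases fuel with
  | zero => simp [PySem.Chars.splitOnMax.go]
  | succ f => cases l with
    | nil => simp [PySem.Chars.splitOnMax.go]
    | cons c rest => simp [PySem.Chars.splitOnMax.go]

theorem pvGoMax1 (pre : List Char) (hpre : '=' ∉ pre) :
    ∀ (rest : List Char) (fuel : Nat) (cur : List Char) (acc : List (List Char)),
      pre.length + rest.length < fuel →
      PySem.Chars.splitOnMax.go ['='] fuel 1 (pre ++ '=' :: rest) cur acc =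
        acc.reverse ++ [cur.reverse ++ pre, rest] := by
  induction pre with
  | nil =>
    intro rest fuel cur acc hf
    cases fuel with
    | zero => omega
    | succ f =>
      have hp : List.isPrefixOf ['='] ('=' :: rest) = true := by simp [List.isPrefixOf]
      simp only [List.nil_append]
      simp only [PySem.Chars.splitOnMax.go, hp, if_true]
      simp only [show (1 : Nat) ≠ 0 by omega, if_false]
      rw [pvGoMax0]
      simp
  | cons a pre ih =>
    intro rest fuel cur acc hf
    have ha : a ≠ '=' := fun he => hpre (by simp [he])
    have hpre' : '=' ∉ pre := fun hm => hpre (by simp [hm])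
    cases fuel with
    | zero => omega
    | succ f =>
      have hp : List.isPrefixOf ['='] (a :: (pre ++ '=' :: rest)) = false := by
        simp [List.isPrefixOf]; intro h; exact absurd h.symm ha
      simp only [List.cons_append]
      simp only [PySem.Chars.splitOnMax.go, hp, Bool.false_eq_true, if_false,
        show (1 : Nat) ≠ 0 by omega]
      rw [ih hpre' rest f (a :: cur) acc (by simp at hf ⊢; omega)]
      simp

-- piece.split("=", maxsplit=1)[1] is piece[13:] when piece.lower() starts with "spacesbefore="
theorem pvPieceEq (p : String)
    (h : PySem.Str.startswith (PySem.Str.lower p) "spacesbefore=" = true) :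
    PySem.List.pyGetD ((PySem.Str.splitMax? p "=" 1).getD []) 1 "" = PySem.Str.slice p (some 13) none := by
  have hpref : ("spacesbefore".toList ++ ['=']) <+: p.toList.map PySem.Chars.lowerChar := by
    have := h
    simp [PySem.Str.startswith, PySem.Str.lower, PySem.Chars.startswith, PySem.Chars.lower] at this
    exact this
  obtain ⟨pre, rest, hl, hnp, hlen⟩ := pvPrefixStruct "spacesbefore".toList (by decide) p.toList hpref
  have hlen12 : pre.length = 12 := by simpa using hlen
  have hsplit : PySem.Chars.splitOnMax p.toList ['='] 1 = [pre, rest] := by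
    unfold PySem.Chars.splitOnMax
    simp only [show ¬ ((1:Int) < 0) by norm_num, if_false]
    rw [hl]
    simp only [show Int.toNat 1 = 1 from rfl]
    rw [pvGoMax1 pre hnp rest _ [] [] (by simp)]
    simp
  have hmax : PySem.Str.splitMax? p "=" 1 = some [String.ofList pre, String.ofList rest] := by
    simp [PySem.Str.splitMax?, PySem.Chars.splitMax?, hsplit]
  rw [hmax]
  have hget : PySem.List.pyGetD [String.ofList pre, String.ofList rest] 1 "" = String.ofList rest := by
    simp [PySem.List.pyGetD]
  simp only [Option.getD_some, hget]
  have hdrop : p.toList.drop 13 = rest := by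
    rw [hl, show (13 : Nat) = pre.length + 1 by omega]
    simp [List.drop_append]
  rw [PySem.Str.slice]
  apply congrArg String.ofList
  rw [PySem.Chars.slice_eq_listSlice]
  have hsf : PySem.List.slice p.toList (some (13:Int)) none = p.toList.drop (Int.toNat 13) :=
    PySem.List.slice_from p.toList (by norm_num)
  rw [hsf, show Int.toNat 13 = 13 from rfl, hdrop]

theorem pvLoopA_eq (ps : List String) :
    pvLoopA ps = (match ps.find? (fun p => PySem.Str.startswith (PySem.Str.lower p) "spacesbefore=") with
                  | some p => pvDecodeB (PySem.Str.slice p (some 13) none)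
                  | none => "") := by
  induction ps with
  | nil => simp [pvLoopA]
  | cons p ps ih =>
    by_cases hp : PySem.Str.startswith (PySem.Str.lower p) "spacesbefore=" = true
    · have hf : List.find? (fun p => PySem.Str.startswith (PySem.Str.lower p) "spacesbefore=") (p :: ps)
          = some p := List.find?_cons_of_pos hp
      simp only [pvLoopA, hp, Bool.not_true, Bool.false_eq_true, if_false, hf]
      rw [pvPieceEq p hp, pvDecodeB_eq]
    · have hp' : PySem.Str.startswith (PySem.Str.lower p) "spacesbefore=" = false := by
        simpa using hp
      have hf : List.find? (fun p => PySem.Str.startswith (PySem.Str.lower p) "spacesbefore=") (p :: ps)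
          = List.find? (fun p => PySem.Str.startswith (PySem.Str.lower p) "spacesbefore=") ps :=
        List.find?_cons_of_neg (by simpa [PySem.Str.startswith, PySem.Str.lower] using hp')
      simp only [pvLoopA, hp', Bool.not_false, if_true, hf]
      exact ih

-- ===== VERDICT (by name: the statement is the Claim_ definition above) =====
theorem misc_to_space_before_spec : Claim_equal_misc_to_space_before := by
  intro misc _
  unfold Spec_misc_to_space_before
  unfold misc_to_space_before misc_to_space_before_alt
  by_cases hm : misc = ""
  · subst hm; decide
  · simp only [hm, if_false]
    rw [pvLoopA_eq]
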